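-- pv_equiv track=rewrite | github.com/zhenya-mamenko/WalkingMarvin | marvin.py | createSchema
-- ===== SOURCE A (Python) =====
-- def createSchema(layers = 1, neurons = [1]):
-- 	schema = []
-- 	layer_len = neurons[0]
-- 	for n in neurons:
-- 		layer = []
--
-- 		for _ in range(n):
-- 			layer.append([layer_len])
-- 		layer_len = len(layer)
-- 		schema.append(layer)
-- 	return schema
-- ===== SOURCE B (Python) =====
-- def createSchema(layers = 1, neurons = [1]):
-- 	def build(width, ns):
-- 		if len(ns) == 1:
-- 			return [[[width] for _ in range(ns[0])]]
-- 		mid = len(ns) // 2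
-- 		left = build(width, ns[:mid])
-- 		right = build(len(left[-1]), ns[mid:])
-- 		return left + right
-- 	return build(neurons[0], neurons)
-- ===== Notes on version B (the rewrite author's own statement) =====
-- stated objective: alternative
-- what changed: Replaces the stateful left-to-right loop threading layer_len with a divide-and-conquer recursion: each half of neurons is built independently, and the right half's starting width is read off as the length of the left half's last built layer.
import Mathlib
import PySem

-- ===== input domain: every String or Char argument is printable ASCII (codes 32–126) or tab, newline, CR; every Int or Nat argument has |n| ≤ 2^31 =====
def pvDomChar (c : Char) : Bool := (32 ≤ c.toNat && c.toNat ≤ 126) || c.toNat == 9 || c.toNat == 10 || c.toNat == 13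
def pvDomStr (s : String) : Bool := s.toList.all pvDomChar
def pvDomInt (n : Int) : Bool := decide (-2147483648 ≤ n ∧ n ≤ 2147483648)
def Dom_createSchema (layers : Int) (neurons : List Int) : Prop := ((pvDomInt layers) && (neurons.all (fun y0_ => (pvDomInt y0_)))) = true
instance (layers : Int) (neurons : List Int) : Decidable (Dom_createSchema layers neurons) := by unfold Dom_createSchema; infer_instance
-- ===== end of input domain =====

-- B replaces the stateful left-to-right loop threading layer_len with a divide-and-conquer
-- recursion: each half of neurons is built independently, the right half starting from the
-- length of the left half's last built layer (objective: alternative decomposition).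

-- ===== PORT A =====
-- A's loop: state = (schema, layer_len); layer built by appending [layer_len] n times.
def createSchema (layers : Int) (neurons : List Int) : List (List (List Int)) :=
  let st := neurons.foldl
    (fun (st : List (List (List Int)) × Int) n =>
      let layer : List (List Int) := (PySem.List.pyRange 0 n 1).map (fun _ => [st.2])
      (st.1 ++ [layer], (layer.length : Int)))
    ([], (PySem.List.pyGet? neurons 0).getD 0)
  st.1

-- ===== PORT B =====
-- B's build(width, ns): singleton base case, else split at mid = len // 2, build the left
-- half, then the right half starting from len(left[-1]).  Python's build is never called
-- on []; the [] branch is only a totality guard.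
def createSchemaBuild : Int → List Int → List (List (List Int))
  | _, [] => []
  | width, [n] => [(PySem.List.pyRange 0 n 1).map (fun _ => [width])]
  | width, a :: b :: t =>
    let mid := (a :: b :: t).length / 2
    let left := createSchemaBuild width ((a :: b :: t).take mid)
    let right := createSchemaBuild ((((PySem.List.pyGet? left (-1)).getD []).length : Nat) : Int) ((a :: b :: t).drop mid)
    left ++ right
termination_by _ ns => ns.length
decreasing_by
  · simp only [List.length_take, List.length_cons]; omega
  · simp only [List.length_drop, List.length_cons]; omega

def createSchema_alt (layers : Int) (neurons : List Int) : List (List (List Int)) :=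
  createSchemaBuild ((PySem.List.pyGet? neurons 0).getD 0) neurons

-- ===== PRECONDITION & SPEC =====
-- Both A and B raise IndexError (neurons[0]) on the empty list; excluded.
def Pre_createSchema (layers : Int) (neurons : List Int) : Prop := neurons ≠ []
instance (layers : Int) (neurons : List Int) : Decidable (Pre_createSchema layers neurons) := by unfold Pre_createSchema; infer_instance
def pvWitness_createSchema : Int × List Int := (1, [2, 3, 1])

def Spec_createSchema (layers : Int) (neurons : List Int) (out : List (List (List Int))) : Prop := out = createSchema_alt layers neurons
instance (layers : Int) (neurons : List Int) (out : List (List (List Int))) : Decidable (Spec_createSchema layers neurons out) := by unfold Spec_createSchema; infer_instance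

-- ===== CLAIM (what is proved, stated in full; the proofs are below) =====
def Claim_equal_createSchema : Prop := ∀ (layers : Int) (neurons : List Int), Dom_createSchema layers neurons → Pre_createSchema layers neurons → Spec_createSchema layers neurons (createSchema layers neurons)

-- ===== LEMMAS AND PROOFS =====

-- linear characterisation of the schema (proof-only helper)
def pvLin (w : Int) : List Int → List (List (List Int))
  | [] => []
  | n :: t =>
    let layer : List (List Int) := (PySem.List.pyRange 0 n 1).map (fun _ => [w])
    layer :: pvLin (layer.length : Int) t

-- the width carried after processing a prefix
def pvW (w : Int) (l : List Int) : Int := l.foldl (fun _ n => max n 0) w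

theorem pvLayer_len (c n : Int) :
    ((((PySem.List.pyRange 0 n 1).map (fun _ => ([c] : List Int))).length : Nat) : Int) = max n 0 := by
  simp [PySem.List.length_pyRange_one]

theorem pvW_cons (w n : Int) (t : List Int) : pvW w (n :: t) = pvW (max n 0) t := rfl

theorem pvLin_append (l1 l2 : List Int) (w : Int) :
    pvLin w (l1 ++ l2) = pvLin w l1 ++ pvLin (pvW w l1) l2 := by
  induction l1 generalizing w with
  | nil => simp [pvLin, pvW]
  | cons n t ih =>
    simp only [List.cons_append, pvLin, pvLayer_len, ih, pvW_cons, List.cons_append]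

theorem pvLin_last (w : Int) (ns : List Int) (h : ns ≠ []) :
    ((((PySem.List.pyGet? (pvLin w ns) (-1)).getD []).length : Nat) : Int) = pvW w ns := by
  induction ns generalizing w with
  | nil => exact absurd rfl h
  | cons n t ih =>
    cases t with
    | nil => simp [pvLin, PySem.List.pyGet?_neg_one, pvW]
    | cons m s =>
      have hih := ih ((((PySem.List.pyRange 0 n 1).map (fun _ => ([w] : List Int))).length : Nat) : Int) (by simp)
      simp only [pvLin, PySem.List.pyGet?_neg_one] at hih ⊢
      rw [List.getLast?_cons_cons, hih]
      simp only [pvW_cons]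

theorem pvBuild_eq_lin (ns : List Int) (w : Int) :
    createSchemaBuild w ns = pvLin w ns := by
  induction hn : ns.length using Nat.strong_induction_on generalizing ns w with
  | _ k ih =>
    match ns with
    | [] => simp [createSchemaBuild, pvLin]
    | [n] => simp [createSchemaBuild, pvLin]
    | a :: b :: t =>
      subst hn
      rw [createSchemaBuild]
      rw [ih ((a :: b :: t).take ((a :: b :: t).length / 2)).length
            (by simp only [List.length_take, List.length_cons]; omega) _ _ rfl]
      rw [ih ((a :: b :: t).drop ((a :: b :: t).length / 2)).length
            (by simp only [List.length_drop, List.length_cons]; omega) _ _ rfl]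
      rw [pvLin_last _ _ (by
            intro hemp
            have hl := congrArg List.length hemp
            simp only [List.length_take, List.length_cons, List.length_nil] at hl
            omega)]
      rw [← pvLin_append]
      simp

-- A's fold from any (acc, c) equals acc ++ pvLin c l
theorem pv_fold_eq (l : List Int) (acc : List (List (List Int))) (c : Int) :
    (l.foldl
      (fun (st : List (List (List Int)) × Int) n =>
        let layer : List (List Int) := (PySem.List.pyRange 0 n 1).map (fun _ => [st.2])
        (st.1 ++ [layer], (layer.length : Int)))
      (acc, c)).1
    = acc ++ pvLin c l := by
  induction l generalizing acc c with
  | nil => simp [pvLin]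
  | cons n t ih =>
    simp only [List.foldl_cons, pvLin]
    rw [ih]
    simp

-- ===== VERDICT (by name: the statement is the Claim_ definition above) =====
theorem createSchema_spec : Claim_equal_createSchema := by
  intro layers neurons _ _
  unfold Spec_createSchema createSchema createSchema_alt
  rw [pv_fold_eq, pvBuild_eq_lin]
  simp
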